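-- pv_equiv track=rewrite | github.com/ashdrissi/erp-deploy | scripts/sidebar_app_desktop_override.py | _filter_pages_for_workspace
-- ===== SOURCE A (Python) =====
-- def _filter_pages_for_workspace(pages, workspace_name):
--     if not pages:
--         return pages
--
--     def key(value):
--         return (value or "").strip().lower()
--
--     target_key = key(workspace_name)
--     if not target_key:
--         return pages
--
--     root_name = None
--     for page in pages:
--         for field in ("name", "title", "label"):
--             if key(page.get(field)) == target_key:
--                 root_name = page.get("name")
--                 break
--         if root_name:
--             break
--
--     if not root_name:
--         return pages
--
--     selected = {root_name}
--     changed = True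
--     while changed:
--         changed = False
--         for page in pages:
--             parent = page.get("parent_page")
--             name = page.get("name")
--             if parent in selected and name not in selected:
--                 selected.add(name)
--                 changed = True
--
--     filtered = [page for page in pages if page.get("name") in selected]
--     return filtered or pages
-- ===== SOURCE B (Python) =====
-- def _filter_pages_for_workspace(pages, workspace_name):
--     if not pages:
--         return pages
--
--     def key(value):
--         return (value or "").strip().lower()
--
--     target_key = key(workspace_name)
--     if not target_key:
--         return pages
--
--     root_name = None
--     for page in pages:
--         name = page.get("name")
--         if name and any(key(page.get(f)) == target_key for f in ("name", "title", "label")):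
--             root_name = name
--             break
--
--     if not root_name:
--         return pages
--
--     children = {}
--     for page in pages:
--         children.setdefault(page.get("parent_page"), []).append(page.get("name"))
--
--     seen = {root_name}
--     order = [root_name]
--     i = 0
--     while i < len(order):
--         cur = order[i]
--         i += 1
--         for child in children.get(cur, ()):
--             if child not in seen:
--                 seen.add(child)
--                 order.append(child)
--
--     filtered = [page for page in pages if page.get("name") in seen]
--     return filtered or pages
-- ===== Notes on version B (the rewrite author's own statement) =====
-- stated objective: alternative
-- what changed: A grows the selected set by repeatedly re-sweeping the whole page list until a sweep adds nothing; B builds a parent->children adjacency dict once and collects the root's descendants with a single worklist (BFS) traversal, then filters once.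
import Mathlib
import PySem

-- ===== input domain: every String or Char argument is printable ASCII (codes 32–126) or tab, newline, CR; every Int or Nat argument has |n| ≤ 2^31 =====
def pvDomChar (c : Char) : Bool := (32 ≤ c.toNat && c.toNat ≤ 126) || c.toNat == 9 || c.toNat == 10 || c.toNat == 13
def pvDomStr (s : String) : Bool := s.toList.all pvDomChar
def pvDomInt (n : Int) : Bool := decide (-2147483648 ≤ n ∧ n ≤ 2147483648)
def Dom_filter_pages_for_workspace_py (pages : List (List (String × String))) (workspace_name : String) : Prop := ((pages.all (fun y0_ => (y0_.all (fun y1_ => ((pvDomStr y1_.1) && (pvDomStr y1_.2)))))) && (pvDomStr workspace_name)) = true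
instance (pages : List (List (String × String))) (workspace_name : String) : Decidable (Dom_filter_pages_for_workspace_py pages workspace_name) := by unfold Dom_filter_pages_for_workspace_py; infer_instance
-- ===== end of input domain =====

-- B replaces A's repeated full-list fixpoint sweeps by a parent→children adjacency dict and a single
-- worklist (BFS) traversal from the root (objective: alternative algorithm, same measured cost).

-- shared helpers (both Pythons use the same `key`, dict lookup and truthiness tests)
def pvKey (v : Option String) : String := PySem.Str.lower (PySem.Str.strip (v.getD ""))
def pvGet (p : List (String × String)) (k : String) : Option String := (PySem.Dict.mk p).get? k
def pvTruthy : Option String → Bool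
  | none => false
  | some s => !(s == "")

-- ===== PORT A =====
-- inner `for field in (...)` with break: root_name is set iff some field's key matches
def pvMatch (target : String) (p : List (String × String)) : Bool :=
  ["name", "title", "label"].any (fun f => pvKey (pvGet p f) == target)

-- A's root search: r is the running root_name; it is overwritten on a match and the outer
-- loop breaks only when it became truthy
def pvFindRootA (target : String) : List (List (String × String)) → Option String → Option String
  | [], r => r
  | p :: rest, r =>
      let r' := if pvMatch target p then pvGet p "name" else r
      if pvTruthy r' then r' else pvFindRootA target rest r'

-- one `for page in pages` sweep of A's while-loop body
def pvPassA : List (List (String × String)) → PySem.Set (Option String) → Bool →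
    PySem.Set (Option String) × Bool
  | [], sel, ch => (sel, ch)
  | p :: rest, sel, ch =>
      let parent := pvGet p "parent_page"
      let name := pvGet p "name"
      if sel.contains parent && !(sel.contains name) then
        pvPassA rest (sel.add name) true
      else
        pvPassA rest sel ch

-- A's `while changed` loop; fuel pages.length + 1 always suffices (each re-entered sweep has
-- strictly enlarged `selected`, which stays inside the names of pages: lemma pvLoopA_closed below)
def pvLoopA (pages : List (List (String × String))) :
    Nat → PySem.Set (Option String) → PySem.Set (Option String)
  | 0, sel => sel
  | Nat.succ fuel, sel =>
      let r := pvPassA pages sel false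
      if r.2 then pvLoopA pages fuel r.1 else r.1

def filter_pages_for_workspace_py (pages : List (List (String × String))) (workspace_name : String) : List (List (String × String)) :=
  if pages.isEmpty then pages
  else
    let target := pvKey (some workspace_name)
    if target == "" then pages
    else
      let root := pvFindRootA target pages none
      if !pvTruthy root then pages
      else
        let sel := pvLoopA pages (pages.length + 1) (PySem.Set.ofList [root])
        let filtered := pages.filter (fun p => sel.contains (pvGet p "name"))
        if filtered.isEmpty then pages else filtered

-- ===== PORT B =====
-- B's root search: first page whose name is truthy and which matches
def pvFindRootB (target : String) : List (List (String × String)) → Option String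
  | [] => none
  | p :: rest =>
      let name := pvGet p "name"
      if pvTruthy name && pvMatch target p then name else pvFindRootB target rest

-- children.setdefault(parent, []).append(name)
def pvBuildAdj : List (List (String × String)) →
    PySem.Dict (Option String) (List (Option String)) → PySem.Dict (Option String) (List (Option String))
  | [], adj => adj
  | p :: rest, adj =>
      let k := pvGet p "parent_page"
      pvBuildAdj rest (adj.insert k (adj.getD k [] ++ [pvGet p "name"]))

-- inner `for child in children.get(cur, ())`: collect unseen children into seen and the queue tail
def pvScan : List (Option String) → PySem.Set (Option String) → List (Option String) →
    PySem.Set (Option String) × List (Option String)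
  | [], seen, acc => (seen, acc)
  | c :: cs, seen, acc =>
      if seen.contains c then pvScan cs seen acc
      else pvScan cs (seen.add c) (acc ++ [c])

-- B's worklist loop (`order` with cursor i = the queue order[i:]); fuel pages.length + 1 always
-- suffices: every dequeued element was enqueued exactly once, when it newly entered `seen`,
-- and `seen` stays inside the names of pages (lemma pvWalkB_closed below)
def pvWalkB (adj : PySem.Dict (Option String) (List (Option String))) :
    Nat → PySem.Set (Option String) → List (Option String) → PySem.Set (Option String)
  | _, seen, [] => seen
  | 0, seen, _ :: _ => seen
  | Nat.succ fuel, seen, cur :: rest =>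
      let r := pvScan (adj.getD cur []) seen []
      pvWalkB adj fuel r.1 (rest ++ r.2)

def filter_pages_for_workspace_py_alt (pages : List (List (String × String))) (workspace_name : String) : List (List (String × String)) :=
  if pages.isEmpty then pages
  else
    let target := pvKey (some workspace_name)
    if target == "" then pages
    else
      let root := pvFindRootB target pages
      if !pvTruthy root then pages
      else
        let adj := pvBuildAdj pages PySem.Dict.empty
        let seen := pvWalkB adj (pages.length + 1) (PySem.Set.ofList [root]) [root]
        let filtered := pages.filter (fun p => seen.contains (pvGet p "name"))
        if filtered.isEmpty then pages else filtered

-- ===== PRECONDITION & SPEC =====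
def Spec_filter_pages_for_workspace_py (pages : List (List (String × String))) (workspace_name : String) (out : List (List (String × String))) : Prop := out = filter_pages_for_workspace_py_alt pages workspace_name
instance (pages : List (List (String × String))) (workspace_name : String) (out : List (List (String × String))) : Decidable (Spec_filter_pages_for_workspace_py pages workspace_name out) := by unfold Spec_filter_pages_for_workspace_py; infer_instance

-- ===== CLAIM (what is proved, stated in full; the proofs are below) =====
def Claim_equal_filter_pages_for_workspace_py : Prop := ∀ (pages : List (List (String × String))) (workspace_name : String), Dom_filter_pages_for_workspace_py pages workspace_name → Spec_filter_pages_for_workspace_py pages workspace_name (filter_pages_for_workspace_py pages workspace_name)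

-- ===== LEMMAS AND PROOFS =====

-- the page graph: one edge parent_page → name per page; pvReach = reachable from root
def pvEdge (pages : List (List (String × String))) (a b : Option String) : Prop :=
  ∃ p, p ∈ pages ∧ pvGet p "parent_page" = a ∧ pvGet p "name" = b

inductive pvReach (pages : List (List (String × String))) (root : Option String) : Option String → Prop
  | base : pvReach pages root root
  | step {a b : Option String} : pvReach pages root a → pvEdge pages a b → pvReach pages root b

def pvNames (pages : List (List (String × String))) : List (Option String) :=
  pages.map (fun p => pvGet p "name")

-- a Nodup list included in another is no longer than it
theorem pvNodupLen {l₁ l₂ : List (Option String)} (h1 : l₁.Nodup) (hs : l₁ ⊆ l₂) :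
    l₁.length ≤ l₂.length := by
  calc l₁.length = l₁.toFinset.card := (List.toFinset_card_of_nodup h1).symm
    _ ≤ l₂.toFinset.card := Finset.card_le_card (by
        intro x hx; simp only [List.mem_toFinset] at *; exact hs hx)
    _ ≤ l₂.length := l₂.toFinset_card_le

-- ---------- root-search lemmas ----------

theorem pvFindRoot_rel (target : String) : ∀ (ps : List (List (String × String))) (r : Option String),
    pvTruthy r = false →
    pvFindRootB target ps =
      (if pvTruthy (pvFindRootA target ps r) then pvFindRootA target ps r else none) := by
  intro ps
  induction ps with
  | nil => intro r hr; simp [pvFindRootA, pvFindRootB, hr]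
  | cons p rest ih =>
    intro r hr
    by_cases hm : pvMatch target p
    · by_cases hn : pvTruthy (pvGet p "name")
      · simp [pvFindRootA, pvFindRootB, hm, hn]
      · have hn' : pvTruthy (pvGet p "name") = false := by simpa using hn
        have h1 : pvFindRootA target (p :: rest) r = pvFindRootA target rest (pvGet p "name") := by
          simp [pvFindRootA, hm, hn']
        have h2 : pvFindRootB target (p :: rest) = pvFindRootB target rest := by
          simp [pvFindRootB, hn']
        rw [h1, h2]
        exact ih _ hn'
    · have hm' : pvMatch target p = false := by simpa using hm
      have h1 : pvFindRootA target (p :: rest) r = pvFindRootA target rest r := by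
        simp [pvFindRootA, hm', hr]
      have h2 : pvFindRootB target (p :: rest) = pvFindRootB target rest := by
        simp [pvFindRootB, hm']
      rw [h1, h2]
      exact ih r hr

theorem pvFindRootB_mem (target : String) : ∀ (ps : List (List (String × String))),
    pvFindRootB target ps ≠ none → pvFindRootB target ps ∈ pvNames ps := by
  intro ps
  induction ps with
  | nil => intro h; simp [pvFindRootB] at h
  | cons p rest ih =>
    intro h
    simp only [pvFindRootB] at h ⊢
    by_cases hc : pvTruthy (pvGet p "name") && pvMatch target p
    · simp [hc, pvNames]
    · simp only [hc, if_false] at h ⊢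
      simp only [pvNames, List.map_cons, List.mem_cons]
      exact Or.inr (ih h)

-- ---------- A-side loop lemmas ----------

theorem pvNodupAppendSingleton {l : List (Option String)} {x : Option String}
    (h : l.Nodup) (hx : x ∉ l) : (l ++ [x]).Nodup := by
  rw [List.nodup_append]
  exact ⟨h, List.nodup_singleton x,
    fun a ha b hb => by simp only [List.mem_singleton] at hb; exact fun hab => hx ((hab.trans hb) ▸ ha)⟩

theorem pvNotMemOfContainsFalse {l : PySem.Set (Option String)} {x : Option String}
    (h : l.contains x = false) : x ∉ l := by
  intro hm
  have hc := (PySem.Set.contains_iff l x).2 hm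
  rw [hc] at h
  exact Bool.noConfusion h

theorem pvPassA_shape : ∀ (ps : List (List (String × String))) (sel : PySem.Set (Option String)) (ch : Bool),
    sel.Nodup →
    ∃ new, pvPassA ps sel ch = (sel ++ new, ch || !new.isEmpty) ∧
      (sel ++ new).Nodup ∧ (∀ x ∈ new, x ∈ pvNames ps) := by
  intro ps
  induction ps with
  | nil => intro sel ch h; exact ⟨[], by simp [pvPassA], by simpa using h, by simp⟩
  | cons p rest ih =>
    intro sel ch h
    simp only [pvPassA]
    by_cases hb : sel.contains (pvGet p "parent_page") && !(sel.contains (pvGet p "name"))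
    · have hb2 := hb
      rw [Bool.and_eq_true] at hb2
      have hb' : sel.contains (pvGet p "name") = false := by simpa using hb2.2
      have hnm : pvGet p "name" ∉ sel := pvNotMemOfContainsFalse hb'
      have hadd : sel.add (pvGet p "name") = sel ++ [pvGet p "name"] := by
        simp only [PySem.Set.add]
        rw [if_neg (by simp [hnm])]
      have hnd : (sel ++ [pvGet p "name"]).Nodup := pvNodupAppendSingleton h hnm
      obtain ⟨new, heq, hnd', hmem'⟩ := ih (sel ++ [pvGet p "name"]) true hnd
      refine ⟨pvGet p "name" :: new, ?_, ?_, ?_⟩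
      · rw [if_pos hb, hadd, heq, List.append_assoc]
        simp
      · rw [List.append_assoc] at hnd'
        exact hnd'
      · intro x hx
        rcases List.mem_cons.1 hx with hx | hx
        · simp [hx, pvNames]
        · simp only [pvNames, List.map_cons, List.mem_cons]
          exact Or.inr (hmem' x hx)
    · obtain ⟨new, heq, hnd', hmem'⟩ := ih sel ch h
      refine ⟨new, ?_, hnd', ?_⟩
      · rw [if_neg hb, heq]
      · intro x hx
        simp only [pvNames, List.map_cons, List.mem_cons]
        exact Or.inr (hmem' x hx)

theorem pvPassA_sound (pages : List (List (String × String))) (root : Option String) :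
    ∀ (ps : List (List (String × String))) (sel : PySem.Set (Option String)) (ch : Bool),
    (∀ p ∈ ps, p ∈ pages) → (∀ x ∈ sel, pvReach pages root x) →
    ∀ x ∈ (pvPassA ps sel ch).1, pvReach pages root x := by
  intro ps
  induction ps with
  | nil => intro sel ch _ hsel x hx; exact hsel x (by simpa [pvPassA] using hx)
  | cons p rest ih =>
    intro sel ch hps hsel x hx
    simp only [pvPassA] at hx
    by_cases hb : sel.contains (pvGet p "parent_page") && !(sel.contains (pvGet p "name"))
    · rw [if_pos hb] at hx
      have hpar : pvGet p "parent_page" ∈ sel := by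
        have := hb
        simp only [Bool.and_eq_true] at this
        exact (PySem.Set.contains_iff _ _).1 this.1
      have hre : pvReach pages root (pvGet p "name") :=
        pvReach.step (hsel _ hpar) ⟨p, hps p (by simp), rfl, rfl⟩
      refine ih _ true (fun q hq => hps q (by simp [hq])) ?_ x hx
      intro y hy
      rcases (PySem.Set.mem_add sel _ y).1 hy with hy | hy
      · exact hsel y hy
      · exact hy ▸ hre
    · rw [if_neg hb] at hx
      exact ih _ ch (fun q hq => hps q (by simp [hq])) hsel x hx

theorem pvPassA_unchanged : ∀ (ps : List (List (String × String))) (sel : PySem.Set (Option String)),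
    sel.Nodup → (pvPassA ps sel false).2 = false →
    (pvPassA ps sel false).1 = sel ∧
      ∀ p ∈ ps, pvGet p "parent_page" ∈ sel → pvGet p "name" ∈ sel := by
  intro ps
  induction ps with
  | nil => intro sel _ _; exact ⟨by simp [pvPassA], by simp⟩
  | cons p rest ih =>
    intro sel hnd hfl
    simp only [pvPassA] at hfl
    by_cases hb : sel.contains (pvGet p "parent_page") && !(sel.contains (pvGet p "name"))
    · exfalso
      rw [if_pos hb] at hfl
      have hb2 := hb
      rw [Bool.and_eq_true] at hb2
      have hb' : sel.contains (pvGet p "name") = false := by simpa using hb2.2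
      have hnm : pvGet p "name" ∉ sel := pvNotMemOfContainsFalse hb'
      have hadd : sel.add (pvGet p "name") = sel ++ [pvGet p "name"] := by
        simp only [PySem.Set.add]
        rw [if_neg (by simp [hnm])]
      have hnd' : (sel.add (pvGet p "name")).Nodup := by
        rw [hadd]; exact pvNodupAppendSingleton hnd hnm
      obtain ⟨new, heq, _, _⟩ := pvPassA_shape rest (sel.add (pvGet p "name")) true hnd'
      rw [heq] at hfl
      simp at hfl
    · rw [if_neg hb] at hfl
      obtain ⟨h1, h2⟩ := ih sel hnd hfl
      refine ⟨by simp only [pvPassA]; rw [if_neg hb]; exact h1, ?_⟩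
      intro q hq hpar
      rcases List.mem_cons.1 hq with hq | hq
      · subst hq
        have hc := (PySem.Set.contains_iff sel (pvGet q "parent_page")).2 hpar
        by_contra hn
        have hcn : sel.contains (pvGet q "name") = false := by
          rcases Bool.eq_false_or_eq_true (sel.contains (pvGet q "name")) with h | h
          · exact absurd ((PySem.Set.contains_iff _ _).1 h) hn
          · exact h
        rw [hc, hcn] at hb
        simp at hb
      · exact h2 q hq hpar

theorem pvLoopA_mono (pages : List (List (String × String))) :
    ∀ (fuel : Nat) (sel : PySem.Set (Option String)), sel.Nodup →
    ∀ x ∈ sel, x ∈ pvLoopA pages fuel sel := by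
  intro fuel
  induction fuel with
  | zero => intro sel _ x hx; simpa [pvLoopA] using hx
  | succ fuel ih =>
    intro sel hnd x hx
    simp only [pvLoopA]
    obtain ⟨new, heq, hnd', _⟩ := pvPassA_shape pages sel false hnd
    rw [heq]
    by_cases hfl : (false || !new.isEmpty) = true
    · simp only [hfl, if_true]
      exact ih _ hnd' x (by simp [hx])
    · simp only [hfl, if_false]
      simp at hfl
      simp [hfl, hx]

theorem pvLoopA_sound (pages : List (List (String × String))) (root : Option String) :
    ∀ (fuel : Nat) (sel : PySem.Set (Option String)),
    (∀ x ∈ sel, pvReach pages root x) →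
    ∀ x ∈ pvLoopA pages fuel sel, pvReach pages root x := by
  intro fuel
  induction fuel with
  | zero => intro sel hsel x hx; exact hsel x (by simpa [pvLoopA] using hx)
  | succ fuel ih =>
    intro sel hsel x hx
    simp only [pvLoopA] at hx
    by_cases hfl : (pvPassA pages sel false).2 = true
    · rw [if_pos hfl] at hx
      exact ih _ (fun y hy => pvPassA_sound pages root pages sel false (fun _ h => h) hsel y hy) x hx
    · rw [if_neg hfl] at hx
      exact pvPassA_sound pages root pages sel false (fun _ h => h) hsel x hx

theorem pvLoopA_closed (pages : List (List (String × String))) :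
    ∀ (fuel : Nat) (sel : PySem.Set (Option String)), sel.Nodup →
    (∀ x ∈ sel, x ∈ pvNames pages) →
    (pvNames pages).length < fuel + sel.length →
    ∀ p ∈ pages, pvGet p "parent_page" ∈ pvLoopA pages fuel sel →
      pvGet p "name" ∈ pvLoopA pages fuel sel := by
  intro fuel
  induction fuel with
  | zero =>
    intro sel hnd hsub hlt
    exfalso
    have := pvNodupLen hnd (fun x hx => hsub x hx)
    omega
  | succ fuel ih =>
    intro sel hnd hsub hlt p hp hpar
    simp only [pvLoopA] at hpar ⊢
    obtain ⟨new, heq, hnd', hmem'⟩ := pvPassA_shape pages sel false hnd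
    rw [heq] at hpar ⊢
    by_cases hfl : (false || !new.isEmpty) = true
    · simp only [hfl, if_true] at hpar ⊢
      have hne : new ≠ [] := by
        simp only [Bool.false_or] at hfl
        intro h; rw [h] at hfl; simp at hfl
      have hlen : 0 < new.length := List.length_pos_iff.2 hne
      refine ih (sel ++ new) hnd' ?_ (by simp; omega) p hp hpar
      intro x hx
      rcases List.mem_append.1 hx with hx | hx
      · exact hsub x hx
      · exact hmem' x hx
    · simp only [hfl, if_false] at hpar ⊢
      have hnil : new = [] := by
        simp only [Bool.false_or] at hfl
        simpa using hfl
      subst hnil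
      have hfl2 : (pvPassA pages sel false).2 = false := by rw [heq]; simp
      obtain ⟨h1, h2⟩ := pvPassA_unchanged pages sel hnd hfl2
      simp only [List.append_nil] at hpar ⊢
      exact h2 p hp hpar

-- the characterisation of A's selected set: exactly the reachable names
theorem pvSelA_iff (pages : List (List (String × String))) (root : Option String)
    (hroot : root ∈ pvNames pages) :
    ∀ x, x ∈ pvLoopA pages (pages.length + 1) (PySem.Set.ofList [root]) ↔ pvReach pages root x := by
  have hinit : (PySem.Set.ofList [root] : List (Option String)) = [root] := by
    simp [PySem.Set.ofList, PySem.Set.add, PySem.Set.empty]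
  intro x
  constructor
  · intro hx
    refine pvLoopA_sound pages root _ _ ?_ x hx
    intro y hy
    rw [hinit] at hy
    simp only [List.mem_singleton] at hy
    exact hy ▸ pvReach.base
  · intro hx
    induction hx with
    | base =>
      refine pvLoopA_mono pages _ _ (by rw [hinit]; simp) root ?_
      rw [hinit]; simp
    | step hra hedge ihr =>
      obtain ⟨p, hp, hpar, hname⟩ := hedge
      have := pvLoopA_closed pages (pages.length + 1) (PySem.Set.ofList [root])
        (by rw [hinit]; simp)
        (by rw [hinit]; intro y hy; simp only [List.mem_singleton] at hy; exact hy ▸ hroot)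
        (by rw [hinit]; simp only [pvNames, List.length_map, List.length_cons, List.length_nil]; omega)
        p hp (hpar ▸ ihr)
      exact hname ▸ this

-- ---------- B-side lemmas ----------

theorem pvBuildAdj_getD : ∀ (ps : List (List (String × String)))
    (adj : PySem.Dict (Option String) (List (Option String))) (k : Option String),
    (pvBuildAdj ps adj).getD k [] =
      adj.getD k [] ++ (ps.filter (fun p => pvGet p "parent_page" == k)).map (fun p => pvGet p "name") := by
  intro ps
  induction ps with
  | nil => intro adj k; simp [pvBuildAdj]
  | cons p rest ih =>
    intro adj k
    simp only [pvBuildAdj]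
    rw [ih]
    rw [PySem.Dict.getD_insert]
    by_cases hk : k = pvGet p "parent_page"
    · rw [if_pos hk, List.filter_cons, if_pos (by simp [hk])]
      simp [hk]
    · rw [if_neg hk, List.filter_cons,
        if_neg (by simp only [beq_iff_eq]; exact fun h => hk h.symm)]

theorem pvAdj_mem (pages : List (List (String × String))) (k c : Option String) :
    c ∈ (pvBuildAdj pages PySem.Dict.empty).getD k [] ↔ pvEdge pages k c := by
  rw [pvBuildAdj_getD pages PySem.Dict.empty k]
  simp only [PySem.Dict.getD_empty, List.nil_append, List.mem_map, List.mem_filter, beq_iff_eq]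
  constructor
  · rintro ⟨p, ⟨hp, hpar⟩, hname⟩; exact ⟨p, hp, hpar, hname⟩
  · rintro ⟨p, hp, hpar, hname⟩; exact ⟨p, ⟨hp, hpar⟩, hname⟩

theorem pvScan_shape : ∀ (cs : List (Option String)) (seen : PySem.Set (Option String))
    (acc : List (Option String)), seen.Nodup →
    ∃ new, pvScan cs seen acc = (seen ++ new, acc ++ new) ∧ (seen ++ new).Nodup ∧
      (∀ x ∈ new, x ∈ cs) ∧ (∀ c ∈ cs, c ∈ seen ++ new) := by
  intro cs
  induction cs with
  | nil => intro seen acc h; exact ⟨[], by simp [pvScan], by simpa using h, by simp, by simp⟩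
  | cons c cs ih =>
    intro seen acc h
    simp only [pvScan]
    by_cases hc : seen.contains c
    · rw [if_pos hc]
      obtain ⟨new, heq, hnd, hsub, hcov⟩ := ih seen acc h
      refine ⟨new, heq, hnd, ?_, ?_⟩
      · intro x hx; exact List.mem_cons_of_mem _ (hsub x hx)
      · intro d hd
        rcases List.mem_cons.1 hd with hd | hd
        · exact hd ▸ List.mem_append.2 (Or.inl ((PySem.Set.contains_iff _ _).1 hc))
        · exact hcov d hd
    · rw [if_neg hc]
      have hc' : seen.contains c = false := by
        rcases Bool.eq_false_or_eq_true (seen.contains c) with h' | h'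
        · exact absurd h' hc
        · exact h' 
      have hcm : c ∉ seen := pvNotMemOfContainsFalse hc'
      have hadd : seen.add c = seen ++ [c] := by
        simp only [PySem.Set.add]; rw [if_neg (by simp [hcm])]
      have hnd' : (seen ++ [c]).Nodup := pvNodupAppendSingleton h hcm
      obtain ⟨new, heq, hnd, hsub, hcov⟩ := ih (seen ++ [c]) (acc ++ [c]) hnd'
      rw [hadd]
      refine ⟨c :: new, ?_, ?_, ?_, ?_⟩
      · rw [heq, List.append_assoc, List.append_assoc]
        rfl
      · rw [List.append_assoc] at hnd
        exact hnd
      · intro x hx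
        rcases List.mem_cons.1 hx with hx | hx
        · simp [hx]
        · exact List.mem_cons_of_mem _ (hsub x hx)
      · intro d hd
        rcases List.mem_cons.1 hd with hd | hd
        · subst hd; simp
        · have := hcov d hd
          rw [List.append_assoc] at this
          exact this

theorem pvWalkB_sound (pages : List (List (String × String))) (root : Option String) :
    ∀ (fuel : Nat) (queue : List (Option String)) (seen : PySem.Set (Option String)), seen.Nodup →
    (∀ x ∈ seen, pvReach pages root x) → (∀ x ∈ queue, x ∈ seen) →
    ∀ x ∈ pvWalkB (pvBuildAdj pages PySem.Dict.empty) fuel seen queue, pvReach pages root x := by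
  intro fuel
  induction fuel with
  | zero =>
    intro queue seen _ hre _ x hx
    cases queue <;> exact hre x (by simpa [pvWalkB] using hx)
  | succ fuel ih =>
    intro queue seen hnd hre hqs x hx
    cases queue with
    | nil => exact hre x (by simpa [pvWalkB] using hx)
    | cons cur rest =>
      simp only [pvWalkB] at hx
      obtain ⟨new, heq, hnd', hsub, _⟩ :=
        pvScan_shape ((pvBuildAdj pages PySem.Dict.empty).getD cur []) seen [] hnd
      simp only [heq, List.nil_append] at hx
      have hcur : pvReach pages root cur := hre cur (hqs cur (by simp))
      refine ih _ _ hnd' ?_ ?_ x hx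
      · intro y hy
        rcases List.mem_append.1 hy with hy | hy
        · exact hre y hy
        · exact pvReach.step hcur ((pvAdj_mem pages cur y).1 (hsub y hy))
      · intro y hy
        rcases List.mem_append.1 hy with hy | hy
        · exact List.mem_append.2 (Or.inl (hqs y (by simp [hy])))
        · exact List.mem_append.2 (Or.inr hy)

theorem pvWalkB_closed (pages : List (List (String × String)))
    (adj : PySem.Dict (Option String) (List (Option String)))
    (hadjsub : ∀ k c, c ∈ adj.getD k [] → c ∈ pvNames pages) :
    ∀ (fuel : Nat) (queue : List (Option String)) (seen : PySem.Set (Option String)), seen.Nodup →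
    (∀ x ∈ seen, x ∈ pvNames pages) → (∀ x ∈ queue, x ∈ seen) →
    (∀ x ∈ seen, x ∉ queue → ∀ c ∈ adj.getD x [], c ∈ seen) →
    queue.length + (pvNames pages).length < fuel + seen.length →
    (∀ x ∈ seen, x ∈ pvWalkB adj fuel seen queue) ∧
    (∀ x ∈ pvWalkB adj fuel seen queue, ∀ c ∈ adj.getD x [], c ∈ pvWalkB adj fuel seen queue) := by
  intro fuel
  induction fuel with
  | zero =>
    intro queue seen hnd hsub hqs hinv hlt
    have hle := pvNodupLen hnd (fun x hx => hsub x hx)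
    have hq0 : queue = [] := by
      cases queue with
      | nil => rfl
      | cons a l => exfalso; simp only [List.length_cons] at hlt; omega
    subst hq0
    exact ⟨fun x hx => by simpa [pvWalkB] using hx,
      fun x hx c hc => hinv x (by simpa [pvWalkB] using hx) (by simp) c hc⟩
  | succ fuel ih =>
    intro queue seen hnd hsub hqs hinv hlt
    cases queue with
    | nil =>
      exact ⟨fun x hx => by simpa [pvWalkB] using hx,
        fun x hx c hc => hinv x (by simpa [pvWalkB] using hx) (by simp) c hc⟩
    | cons cur rest =>
      simp only [pvWalkB]
      obtain ⟨new, heq, hnd', hsub', hcov⟩ := pvScan_shape (adj.getD cur []) seen [] hnd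
      simp only [heq, List.nil_append]
      have hnewnames : ∀ x ∈ new, x ∈ pvNames pages := fun x hx => hadjsub cur x (hsub' x hx)
      have hnewnotseen : ∀ x ∈ new, x ∉ seen := by
        intro x hx hxs
        have hnd2 : (seen ++ new).Nodup := hnd'
        rw [List.nodup_append] at hnd2
        exact hnd2.2.2 x hxs x hx rfl
      obtain ⟨ihm, ihc⟩ := ih (rest ++ new) (seen ++ new) hnd'
        (by
          intro x hx
          rcases List.mem_append.1 hx with hx | hx
          · exact hsub x hx
          · exact hnewnames x hx)
        (by
          intro x hx
          rcases List.mem_append.1 hx with hx | hx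
          · exact List.mem_append.2 (Or.inl (hqs x (by simp [hx])))
          · exact List.mem_append.2 (Or.inr hx))
        (by
          intro x hx hxq c hc
          rcases List.mem_append.1 hx with hx | hx
          · by_cases hxc : x = cur
            · subst hxc
              exact hcov c hc
            · have hxnq : x ∉ (cur :: rest) := by
                intro hm
                rcases List.mem_cons.1 hm with hm | hm
                · exact hxc hm
                · exact hxq (List.mem_append.2 (Or.inl hm))
              exact List.mem_append.2 (Or.inl (hinv x hx hxnq c hc))
          · exfalso
            exact hxq (List.mem_append.2 (Or.inr hx)))
        (by
          simp only [List.length_append, List.length_cons] at hlt ⊢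
          omega)
      exact ⟨fun x hx => ihm x (List.mem_append.2 (Or.inl hx)), ihc⟩

theorem pvSelB_iff (pages : List (List (String × String))) (root : Option String)
    (hroot : root ∈ pvNames pages) :
    ∀ x, x ∈ pvWalkB (pvBuildAdj pages PySem.Dict.empty) (pages.length + 1)
        (PySem.Set.ofList [root]) [root] ↔ pvReach pages root x := by
  have hinit : (PySem.Set.ofList [root] : List (Option String)) = [root] := by
    simp [PySem.Set.ofList, PySem.Set.add, PySem.Set.empty]
  have hadjsub : ∀ k c, c ∈ (pvBuildAdj pages PySem.Dict.empty).getD k [] → c ∈ pvNames pages := by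
    intro k c hc
    obtain ⟨p, hp, _, hname⟩ := (pvAdj_mem pages k c).1 hc
    exact hname ▸ List.mem_map.2 ⟨p, hp, rfl⟩
  have hmain := pvWalkB_closed pages (pvBuildAdj pages PySem.Dict.empty) hadjsub
    (pages.length + 1) [root] (PySem.Set.ofList [root])
    (by rw [hinit]; simp)
    (by rw [hinit]; intro y hy; simp only [List.mem_singleton] at hy; exact hy ▸ hroot)
    (by rw [hinit]; intro y hy; exact hy)
    (by rw [hinit]; intro x hx hxq; exact absurd hx hxq)
    (by rw [hinit]; simp only [pvNames, List.length_map, List.length_cons, List.length_nil]; omega)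
  intro x
  constructor
  · intro hx
    refine pvWalkB_sound pages root _ _ _ (by rw [hinit]; simp) ?_ ?_ x hx
    · intro y hy
      rw [hinit] at hy
      simp only [List.mem_singleton] at hy
      exact hy ▸ pvReach.base
    · rw [hinit]; intro y hy; exact hy
  · intro hx
    induction hx with
    | base => exact hmain.1 root (by rw [hinit]; simp)
    | step hra hedge ihr =>
      obtain ⟨p, hp, hpar, hname⟩ := hedge
      have := hmain.2 _ ihr (pvGet p "name") (by rw [pvAdj_mem]; exact ⟨p, hp, hpar, rfl⟩)
      exact hname ▸ this

theorem pvTail_eq (pages : List (List (String × String))) (root : Option String)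
    (hroot : root ∈ pvNames pages) :
    (if (pages.filter (fun p => (pvLoopA pages (pages.length + 1)
          (PySem.Set.ofList [root])).contains (pvGet p "name"))).isEmpty then pages
     else pages.filter (fun p => (pvLoopA pages (pages.length + 1)
          (PySem.Set.ofList [root])).contains (pvGet p "name"))) =
    (if (pages.filter (fun p => (pvWalkB (pvBuildAdj pages PySem.Dict.empty) (pages.length + 1)
          (PySem.Set.ofList [root]) [root]).contains (pvGet p "name"))).isEmpty then pages
     else pages.filter (fun p => (pvWalkB (pvBuildAdj pages PySem.Dict.empty) (pages.length + 1)
          (PySem.Set.ofList [root]) [root]).contains (pvGet p "name"))) := by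
  have hfilt : pages.filter (fun p => (pvLoopA pages (pages.length + 1)
        (PySem.Set.ofList [root])).contains (pvGet p "name")) =
      pages.filter (fun p => (pvWalkB (pvBuildAdj pages PySem.Dict.empty) (pages.length + 1)
        (PySem.Set.ofList [root]) [root]).contains (pvGet p "name")) := by
    apply List.filter_congr
    intro p _
    rw [Bool.eq_iff_iff, PySem.Set.contains_iff, PySem.Set.contains_iff,
      pvSelA_iff pages root hroot, pvSelB_iff pages root hroot]
  rw [hfilt]

-- ===== VERDICT (by name: the statement is the Claim_ definition above) =====
theorem filter_pages_for_workspace_py_spec : Claim_equal_filter_pages_for_workspace_py := by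
  intro pages ws _
  unfold Spec_filter_pages_for_workspace_py
  unfold filter_pages_for_workspace_py filter_pages_for_workspace_py_alt
  by_cases hemp : pages.isEmpty
  · rw [if_pos hemp, if_pos hemp]
  · rw [if_neg hemp, if_neg hemp]
    by_cases htgt : (pvKey (some ws) == "") = true
    · rw [if_pos htgt, if_pos htgt]
    · rw [if_neg htgt, if_neg htgt]
      have hrel := pvFindRoot_rel (pvKey (some ws)) pages none (by simp [pvTruthy])
      by_cases htr : pvTruthy (pvFindRootA (pvKey (some ws)) pages none) = true
      · rw [if_pos htr] at hrel
        have hrootne : pvFindRootB (pvKey (some ws)) pages ≠ none := by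
          rw [hrel]
          intro h
          rw [h] at htr
          simp [pvTruthy] at htr
        have hroot : pvFindRootA (pvKey (some ws)) pages none ∈ pvNames pages := by
          have := pvFindRootB_mem (pvKey (some ws)) pages hrootne
          rwa [hrel] at this
        simp only [hrel, htr, Bool.not_true, Bool.false_eq_true, if_false]
        exact pvTail_eq pages _ hroot
      · have htr' : pvTruthy (pvFindRootA (pvKey (some ws)) pages none) = false := by
          simpa using htr
        rw [if_neg htr] at hrel
        rw [if_pos (show (!pvTruthy (pvFindRootA (pvKey (some ws)) pages none)) = true by
          rw [htr']; rfl)]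
        simp [hrel, pvTruthy]
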